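-- pv_equiv track=rewrite | github.com/PolusAI/image-tools | features/polus-cellular-evaluation-plugin/src/evaluate.py | find_over_under
-- ===== SOURCE A (Python) =====
-- def find_over_under(dict_result, data):
-- 	"""Find number of over and under segmented cells.
--
-- 	Args:
-- 		dict_result: dictionary containing predicted labels for each ground truth cell.
-- 		data: data to be saved to csv file.
--
-- 	Returns:
-- 		data: updated csv data with "over" or "under" label assigned to over and under segmented cells.
-- 		over_segmented: number of over segmented cells.
-- 		under_segmented: number of under segmented cells.
-- 	"""
-- 	over_segmented_ = 0; under_segmented_ = 0
-- 	labels = {}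
-- 	for key in dict_result:
-- 		value = dict_result[key]
-- 		if len(value) == 1:
-- 			labels[key] = value[0]
-- 		if len(value) > 1:
-- 			over_segmented_+=1
-- 			data[key].append("over")
--
-- 	dict_new = {}
-- 	for key, value in labels.items():
-- 		dict_new.setdefault(value, set()).add(key)
-- 	res = filter(lambda x: len(x)>1, dict_new.values())
-- 	for i in list(res):
-- 		for ind in i:
-- 			data[ind].append("under")
-- 			under_segmented_+=1
--
-- 	return data, over_segmented_, under_segmented_
-- ===== SOURCE B (Python) =====
-- def find_over_under(dict_result, data):
-- 	"""Count over/under-segmented cells and label csv data.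
--
-- 	Same return value as the original (and, like it, mutates data in place).
-- 	Different algorithm: instead of inverting the labels dict into
-- 	value -> set-of-keys groups and walking the big groups, sort the label
-- 	items by value and detect duplicated values by comparing each sorted
-- 	entry with its neighbours (a duplicate value sits next to an equal one).
-- 	"""
-- 	over_segmented_ = 0
-- 	labels = {}
-- 	for key in dict_result:
-- 		value = dict_result[key]
-- 		if len(value) > 1:
-- 			over_segmented_ += 1
-- 			data[key].append("over")
-- 		elif len(value) == 1:
-- 			labels[key] = value[0]
--
-- 	pairs = sorted(labels.items(), key=lambda kv: kv[1])
-- 	n = len(pairs)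
-- 	under_segmented_ = 0
-- 	for i, (key, value) in enumerate(pairs):
-- 		if (i > 0 and pairs[i - 1][1] == value) or (i + 1 < n and pairs[i + 1][1] == value):
-- 			data[key].append("under")
-- 			under_segmented_ += 1
--
-- 	return data, over_segmented_, under_segmented_
-- ===== Notes on version B (the rewrite author's own statement) =====
-- stated objective: alternative
-- what changed: B drops A's inverted value->set-of-keys dict and its nested walk over the big groups: it sorts the label items by value and tags a key 'under' exactly when a sorted neighbour carries the same value (duplicates are adjacent after sorting), a sort-and-adjacent-scan instead of A's hash-grouping.
import Mathlib
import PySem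

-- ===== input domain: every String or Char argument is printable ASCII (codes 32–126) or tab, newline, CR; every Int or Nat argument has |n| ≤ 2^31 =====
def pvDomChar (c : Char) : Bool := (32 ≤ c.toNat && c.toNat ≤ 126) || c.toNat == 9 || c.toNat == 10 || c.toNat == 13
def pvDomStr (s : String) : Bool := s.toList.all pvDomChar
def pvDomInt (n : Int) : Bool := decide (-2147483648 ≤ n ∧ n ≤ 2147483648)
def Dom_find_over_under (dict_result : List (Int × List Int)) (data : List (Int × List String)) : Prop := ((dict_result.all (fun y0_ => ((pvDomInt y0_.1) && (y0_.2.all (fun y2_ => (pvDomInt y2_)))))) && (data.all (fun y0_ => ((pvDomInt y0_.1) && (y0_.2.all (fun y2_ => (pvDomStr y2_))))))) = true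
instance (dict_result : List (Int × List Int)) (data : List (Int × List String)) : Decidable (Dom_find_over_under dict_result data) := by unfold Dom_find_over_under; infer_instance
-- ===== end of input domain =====

-- B replaces A's inverted value->set-of-keys dict and its nested group/member walk by sorting the
-- label items by value and tagging a key "under" when a sorted neighbour has the same value
-- (objective: alternative). Like A, the Python B mutates `data` in place (appends tags); the
-- equivalence proved here is about the return value.

-- Shared transliteration of the Python statement `data[key].append(t)` on the association-list
-- representation of the `data` dict: exact where the key is present (unique keys); where the key
-- is absent Python raises KeyError — those inputs are excluded by Pre_find_over_under.
def appendTag (d : List (Int × List String)) (k : Int) (t : String) : List (Int × List String) :=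
  match d with
  | [] => []
  | e :: rest => if e.1 = k then (e.1, e.2 ++ [t]) :: rest else e :: appendTag rest k t

-- ===== PORT A =====
-- body of A's first loop: labels[key]=value[0] (len==1), then over count + "over" tag (len>1)
def stepA (st : Int × PySem.Dict Int Int × List (Int × List String)) (kv : Int × List Int) :
    Int × PySem.Dict Int Int × List (Int × List String) :=
  let st := if kv.2.length = 1 then (st.1, st.2.1.insert kv.1 (PySem.List.pyGetD kv.2 0 0), st.2.2) else st
  if 1 < kv.2.length then (st.1 + 1, st.2.1, appendTag st.2.2 kv.1 "over") else st

-- dict_new.setdefault(value, set()).add(key)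
def groupStep (dn : PySem.Dict Int (PySem.Set Int)) (kv : Int × Int) : PySem.Dict Int (PySem.Set Int) :=
  dn.modify kv.2 PySem.Set.empty (fun s => PySem.Set.add s kv.1)

-- body of A's innermost loop: data[ind].append("under"); under_segmented_ += 1
def innerA (st : List (Int × List String) × Int) (k : Int) : List (Int × List String) × Int :=
  (appendTag st.1 k "under", st.2 + 1)

def find_over_under (dict_result : List (Int × List Int)) (data : List (Int × List String)) : (List (Int × List String)) × Int × Int :=
  let p := dict_result.foldl stepA (0, PySem.Dict.empty, data)
  let dict_new := p.2.1.items.foldl groupStep PySem.Dict.empty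
  let res := dict_new.values.filter (fun g => 1 < g.length)
  let q := res.foldl (fun st g => g.foldl innerA st) (p.2.2, 0)
  (q.1, p.1, q.2)

-- ===== PORT B =====
-- body of B's first loop: if len>1 over-tag elif len==1 record label
def stepB (st : Int × PySem.Dict Int Int × List (Int × List String)) (kv : Int × List Int) :
    Int × PySem.Dict Int Int × List (Int × List String) :=
  if 1 < kv.2.length then (st.1 + 1, st.2.1, appendTag st.2.2 kv.1 "over")
  else if kv.2.length = 1 then (st.1, st.2.1.insert kv.1 (PySem.List.pyGetD kv.2 0 0), st.2.2)
  else st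

-- body of B's scan over enumerate(pairs): tag if a same-valued sorted neighbour exists
-- (the i>0 / i+1<n guards make both pairs[i-1] and pairs[i+1] in-range, as in the Python)
def underStepB (pairs : List (Int × Int)) (n : Int) (st : List (Int × List String) × Int)
    (p : Int × (Int × Int)) : List (Int × List String) × Int :=
  if (decide (0 < p.1) && ((PySem.List.pyGet? pairs (p.1 - 1)).any (fun q => q.2 == p.2.2)))
      || (decide (p.1 + 1 < n) && ((PySem.List.pyGet? pairs (p.1 + 1)).any (fun q => q.2 == p.2.2)))
  then (appendTag st.1 p.2.1 "under", st.2 + 1) else st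

def find_over_under_alt (dict_result : List (Int × List Int)) (data : List (Int × List String)) : (List (Int × List String)) × Int × Int :=
  let p := dict_result.foldl stepB (0, PySem.Dict.empty, data)
  let pairs := PySem.List.sorted p.2.1.items (fun kv => kv.2) false
  let n : Int := pairs.length
  let q := (PySem.List.enumerate pairs 0).foldl (underStepB pairs n) (p.2.2, 0)
  (q.1, p.1, q.2)

-- ===== PRECONDITION & SPEC =====
-- Pre_ excludes (a) association lists with duplicate keys, which represent no Python dict (both
-- arguments are dicts in Python), and (b) inputs where A raises KeyError: every key of dict_result
-- that receives an "over" or "under" tag must be a key of data.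
def Pre_find_over_under (dict_result : List (Int × List Int)) (data : List (Int × List String)) : Prop :=
  (dict_result.map Prod.fst).Nodup ∧ (data.map Prod.fst).Nodup ∧
  ∀ kv ∈ dict_result,
    (1 < kv.2.length ∨ (kv.2.length = 1 ∧ ∃ kv' ∈ dict_result, kv'.1 ≠ kv.1 ∧ kv'.2.length = 1 ∧
        PySem.List.pyGetD kv'.2 0 0 = PySem.List.pyGetD kv.2 0 0)) →
    kv.1 ∈ data.map Prod.fst
instance (dict_result : List (Int × List Int)) (data : List (Int × List String)) : Decidable (Pre_find_over_under dict_result data) := by unfold Pre_find_over_under; infer_instance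

def pvWitness_find_over_under : (List (Int × List Int)) × (List (Int × List String)) :=
  ([(1, [7]), (2, [7]), (3, [1, 2]), (4, [])], [(1, []), (2, ["x"]), (3, []), (4, [])])

def Spec_find_over_under (dict_result : List (Int × List Int)) (data : List (Int × List String)) (out : (List (Int × List String)) × Int × Int) : Prop := out = find_over_under_alt dict_result data
instance (dict_result : List (Int × List Int)) (data : List (Int × List String)) (out : (List (Int × List String)) × Int × Int) : Decidable (Spec_find_over_under dict_result data out) := by unfold Spec_find_over_under; infer_instance

-- ===== CLAIM (what is proved, stated in full; the proofs are below) =====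
def Claim_equal_find_over_under : Prop := ∀ (dict_result : List (Int × List Int)) (data : List (Int × List String)), Dom_find_over_under dict_result data → Pre_find_over_under dict_result data → Spec_find_over_under dict_result data (find_over_under dict_result data)

-- ===== LEMMAS AND PROOFS =====

-- `applyTags ks t d`: append tag t at each key of ks in turn
def applyTags (ks : List Int) (t : String) (d : List (Int × List String)) : List (Int × List String) :=
  ks.foldl (fun d k => appendTag d k t) d

-- keys of the label-group of value v, in labels order
def grp (lab : List (Int × Int)) (v : Int) : List Int :=
  (lab.filter (fun kv => kv.2 == v)).map Prod.fst

-- what A's grouping loop builds: value ↦ its group, values in first-occurrence order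
def dnSpec (lab : List (Int × Int)) : PySem.Dict Int (PySem.Set Int) :=
  ⟨(PySem.Set.ofList (lab.map Prod.snd)).map (fun v => (v, grp lab v))⟩

theorem appendTag_fst (d : List (Int × List String)) (k : Int) (t : String) :
    (appendTag d k t).map Prod.fst = d.map Prod.fst := by
  induction d with
  | nil => rfl
  | cons e rest ih =>
    by_cases h : e.1 = k <;> simp [appendTag, h, ih]

theorem appendTag_char (d : List (Int × List String)) (k : Int) (t : String)
    (h : (d.map Prod.fst).Nodup) :
    appendTag d k t = d.map (fun e => if e.1 = k then (e.1, e.2 ++ [t]) else e) := by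
  induction d with
  | nil => rfl
  | cons e rest ih =>
    simp only [List.map_cons, List.nodup_cons] at h
    by_cases hk : e.1 = k
    · simp only [appendTag, hk, List.map_cons]
      have : ∀ x ∈ rest, (if x.1 = k then (x.1, x.2 ++ [t]) else x) = x := by
        intro x hx
        have : x.1 ≠ k := fun hc => h.1 (hk ▸ hc ▸ List.mem_map_of_mem hx)
        simp [this]
      simp [List.map_congr_left this]
    · simp [appendTag, hk, ih h.2]

theorem applyTags_char (ks : List Int) (t : String) (d : List (Int × List String))
    (h : (d.map Prod.fst).Nodup) :
    applyTags ks t d = d.map (fun e => (e.1, e.2 ++ List.replicate (ks.count e.1) t)) := by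
  induction ks generalizing d with
  | nil => simp [applyTags]
  | cons k ks ih =>
    have hfst : ((appendTag d k t).map Prod.fst).Nodup := by rw [appendTag_fst]; exact h
    have : applyTags (k :: ks) t d = applyTags ks t (appendTag d k t) := rfl
    rw [this, ih _ hfst, appendTag_char d k t h, List.map_map]
    apply List.map_congr_left
    intro e _
    by_cases hk : e.1 = k
    · simp [Function.comp, hk, List.replicate_succ, List.append_assoc]
    · simp [Function.comp, hk, Ne.symm hk]

theorem stepA_eq_stepB : stepA = stepB := by
  funext st kv
  unfold stepA stepB
  by_cases h : 1 < kv.2.length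
  · simp [h, show ¬ kv.2.length = 1 by omega]
  · by_cases h1 : kv.2.length = 1 <;> simp [h, h1]

theorem phase1_fst (xs : List (Int × List Int)) (st : Int × PySem.Dict Int Int × List (Int × List String)) :
    ((xs.foldl stepB st).2.2).map Prod.fst = st.2.2.map Prod.fst := by
  induction xs generalizing st with
  | nil => rfl
  | cons kv xs ih =>
    rw [List.foldl_cons, ih]
    unfold stepB
    by_cases h : 1 < kv.2.length
    · simp [h, appendTag_fst]
    · by_cases h1 : kv.2.length = 1 <;> simp [h, h1]

theorem phase1_labels_nodup (xs : List (Int × List Int)) (st : Int × PySem.Dict Int Int × List (Int × List String))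
    (h : st.2.1.keys.Nodup) : ((xs.foldl stepB st).2.1).keys.Nodup := by
  induction xs generalizing st with
  | nil => exact h
  | cons kv xs ih =>
    rw [List.foldl_cons]
    apply ih
    unfold stepB
    by_cases hl : 1 < kv.2.length
    · simpa [hl] using h
    · by_cases h1 : kv.2.length = 1
      · simpa [hl, h1] using PySem.Dict.nodup_keys_insert _ _ _ h
      · simpa [hl, h1] using h

theorem grp_append (lab : List (Int × Int)) (k v v' : Int) :
    grp (lab ++ [(k, v)]) v' = grp lab v' ++ (if v' = v then [k] else []) := by
  unfold grp
  rw [List.filter_append, List.map_append]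
  by_cases h : v' = v
  · subst h; simp
  · have hb : ((v : Int) == v') = false := beq_eq_false_iff_ne.mpr (fun hc => h hc.symm)
    simp [h, hb]

theorem grp_nil_of_not_mem (lab : List (Int × Int)) (v : Int) (h : v ∉ lab.map Prod.snd) :
    grp lab v = [] := by
  unfold grp
  rw [List.filter_eq_nil_iff.mpr, List.map_nil]
  intro kv hkv
  simp only [beq_iff_eq]
  exact fun hc => h (hc ▸ List.mem_map_of_mem hkv)

theorem grp_subset (lab : List (Int × Int)) (v x : Int) (h : x ∈ grp lab v) : x ∈ lab.map Prod.fst := by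
  unfold grp at h
  obtain ⟨kv, hkv, rfl⟩ := List.mem_map.mp h
  exact List.mem_map_of_mem (List.mem_of_mem_filter hkv)

theorem grp_length (lab : List (Int × Int)) (v : Int) :
    (grp lab v).length = (lab.map Prod.snd).count v := by
  unfold grp
  rw [List.length_map, List.count_eq_countP, List.countP_map]
  rw [← List.countP_eq_length_filter]
  rfl

theorem grouping (lab : List (Int × Int)) (h : (lab.map Prod.fst).Nodup) :
    lab.foldl groupStep PySem.Dict.empty = dnSpec lab := by
  induction lab using List.reverseRecOn with
  | nil => rfl
  | append_singleton lab kv ih =>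
    obtain ⟨k, v⟩ := kv
    have h' : (lab.map Prod.fst).Nodup := by
      rw [List.map_append] at h; exact h.of_append_left
    have hk : k ∉ lab.map Prod.fst := by
      rw [List.map_append, List.nodup_append] at h
      exact fun hc => h.2.2 k hc k (by simp) rfl
    rw [List.foldl_append, List.foldl_cons, List.foldl_nil, ih h']
    have hkeys : (dnSpec lab).keys = PySem.Set.ofList (lab.map Prod.snd) := by
      show ((PySem.Set.ofList (lab.map Prod.snd)).map (fun v => (v, grp lab v))).map (fun x => x.1) = _
      rw [List.map_map]
      have : ((fun (x : Int × PySem.Set Int) => x.1) ∘ fun v => (v, grp lab v)) = id := rfl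
      rw [this, List.map_id]
    have hstep : groupStep (dnSpec lab) (k, v)
        = (dnSpec lab).insert v (PySem.Set.add ((dnSpec lab).getD v PySem.Set.empty) k) := rfl
    rw [hstep]
    have hmapsnd : (lab ++ [(k, v)]).map Prod.snd = lab.map Prod.snd ++ [v] := by
      rw [List.map_append]; rfl
    by_cases hv : v ∈ lab.map Prod.snd
    · have hmemD : v ∈ PySem.Set.ofList (lab.map Prod.snd) := (PySem.Set.mem_ofList _ _).mpr hv
      have hcont : (dnSpec lab).contains v = true :=
        (PySem.Dict.contains_iff_mem_keys _ _).mpr (hkeys ▸ hmemD)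
      have hnodk : (dnSpec lab).keys.Nodup := by rw [hkeys]; exact PySem.Set.nodup_ofList _
      have hitem : (v, grp lab v) ∈ (dnSpec lab).items := List.mem_map.mpr ⟨v, hmemD, rfl⟩
      have hgetD : (dnSpec lab).getD v PySem.Set.empty = grp lab v :=
        PySem.Dict.getD_of_mem_items _ hitem hnodk _
      have hadd : PySem.Set.add (grp lab v) k = grp lab v ++ [k] :=
        PySem.Set.add_of_not_mem (fun hc => hk (grp_subset _ _ _ hc))
      apply PySem.Dict.ext
      rw [hgetD, hadd, PySem.Dict.items_insert_of_contains _ _ hcont]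
      have hof : PySem.Set.ofList ((lab ++ [(k, v)]).map Prod.snd)
          = PySem.Set.ofList (lab.map Prod.snd) := by
        rw [hmapsnd, PySem.Set.ofList_append_singleton, PySem.Set.add_of_mem hmemD]
      show ((PySem.Set.ofList (lab.map Prod.snd)).map (fun v' => (v', grp lab v'))).map
            (fun p => if p.1 == v then (v, grp lab v ++ [k]) else p)
          = (PySem.Set.ofList ((lab ++ [(k, v)]).map Prod.snd)).map
            (fun v' => (v', grp (lab ++ [(k, v)]) v'))
      rw [hof, List.map_map]
      apply List.map_congr_left
      intro v' _
      by_cases he : v' = v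
      · subst he; simp [Function.comp, grp_append]
      · have hb : ((v' : Int) == v) = false := beq_eq_false_iff_ne.mpr he
        simp [Function.comp, hb, grp_append, he]
    · have hcont : (dnSpec lab).contains v = false := by
        cases hb : (dnSpec lab).contains v
        · rfl
        · exact absurd ((PySem.Set.mem_ofList _ _).mp
            (hkeys ▸ (PySem.Dict.contains_iff_mem_keys _ _).mp hb)) hv
      have hgetD : (dnSpec lab).getD v PySem.Set.empty = PySem.Set.empty :=
        PySem.Dict.getD_of_not_contains _ _ hcont
      have hadd : PySem.Set.add (PySem.Set.empty : PySem.Set Int) k = [k] :=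
        PySem.Set.add_of_not_mem (by simp [PySem.Set.empty])
      apply PySem.Dict.ext
      rw [hgetD, hadd, PySem.Dict.items_insert_of_not_contains _ _ hcont]
      have hof : PySem.Set.ofList ((lab ++ [(k, v)]).map Prod.snd)
          = PySem.Set.ofList (lab.map Prod.snd) ++ [v] := by
        rw [hmapsnd, PySem.Set.ofList_append_singleton,
          PySem.Set.add_of_not_mem (fun hc => hv ((PySem.Set.mem_ofList _ _).mp hc))]
      show (PySem.Set.ofList (lab.map Prod.snd)).map (fun v' => (v', grp lab v')) ++ [(v, [k])]
          = (PySem.Set.ofList ((lab ++ [(k, v)]).map Prod.snd)).map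
            (fun v' => (v', grp (lab ++ [(k, v)]) v'))
      rw [hof, List.map_append]
      congr 1
      · apply List.map_congr_left
        intro v' hv'
        have he : v' ≠ v := fun hc => hv (hc ▸ (PySem.Set.mem_ofList _ _).mp hv')
        simp [grp_append, he]
      · simp [grp_append, grp_nil_of_not_mem lab v hv]

theorem innerA_char (g : List Int) (dt : List (Int × List String)) (n : Int) :
    g.foldl innerA (dt, n) = (applyTags g "under" dt, n + (g.length : Int)) := by
  induction g generalizing dt n with
  | nil => simp [applyTags]
  | cons k g ih =>
    rw [List.foldl_cons]
    show g.foldl innerA (appendTag dt k "under", n + 1) = _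
    rw [ih]
    simp only [Prod.mk.injEq]
    exact ⟨rfl, by simp only [List.length_cons]; push_cast; ring⟩

theorem nestedA (gs : List (List Int)) (dt : List (Int × List String)) (n : Int) :
    gs.foldl (fun st g => g.foldl innerA st) (dt, n)
      = (applyTags gs.flatten "under" dt, n + (gs.flatten.length : Int)) := by
  induction gs generalizing dt n with
  | nil => simp [applyTags]
  | cons g gs ih =>
    rw [List.foldl_cons, innerA_char, ih]
    simp only [Prod.mk.injEq]
    constructor
    · show _ = applyTags (g ++ gs.flatten) "under" dt
      unfold applyTags
      rw [List.foldl_append]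
    · simp only [List.flatten_cons, List.length_append]; push_cast; ring

theorem res_char (lab : List (Int × Int)) :
    ((dnSpec lab).values.filter (fun g => 1 < g.length))
      = ((PySem.Set.ofList (lab.map Prod.snd)).filter
          (fun v => decide (1 < (lab.map Prod.snd).count v))).map (grp lab) := by
  have hv : (dnSpec lab).values = (PySem.Set.ofList (lab.map Prod.snd)).map (grp lab) := by
    simp [dnSpec, PySem.Dict.values, List.map_map]
  rw [hv, List.filter_map]
  congr 1
  apply List.filter_congr
  intro v _
  simp [Function.comp, grp_length]

theorem filter_or_perm {α : Type} (p q : α → Bool) (l : List α) (h : ∀ x ∈ l, ¬(p x = true ∧ q x = true)) :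
    (l.filter (fun x => p x || q x)).Perm (l.filter p ++ l.filter q) := by
  induction l with
  | nil => simp
  | cons x l ih =>
    have ih' := ih (fun y hy => h y (List.mem_cons_of_mem _ hy))
    by_cases hp : p x = true
    · have hq : ¬ q x = true := fun hq => h x (List.mem_cons_self) ⟨hp, hq⟩
      simpa [hp, hq] using ih'.cons x
    · by_cases hq : q x = true
      · simp only [List.filter_cons, hp, hq]
        simp only [Bool.false_or]
        exact ((ih'.cons x).trans List.perm_middle.symm)
      · simpa [hp, hq] using ih'

theorem permGroup (lab : List (Int × Int)) (D : List Int) (hD : D.Nodup) :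
    ((D.map (grp lab)).flatten).Perm ((lab.filter (fun kv => decide (kv.2 ∈ D))).map Prod.fst) := by
  induction D with
  | nil => simp
  | cons v D ih =>
    have hvD : v ∉ D := (List.nodup_cons.mp hD).1
    have ihD := ih (List.nodup_cons.mp hD).2
    have hsplit : (lab.filter (fun kv => decide (kv.2 ∈ v :: D))).Perm
        (lab.filter (fun kv => kv.2 == v) ++ lab.filter (fun kv => decide (kv.2 ∈ D))) := by
      have : ∀ kv : Int × Int, (decide (kv.2 ∈ v :: D)) = ((kv.2 == v) || decide (kv.2 ∈ D)) := by
        intro kv; by_cases hv : kv.2 = v <;> simp [hv, List.mem_cons]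
      rw [List.filter_congr (fun kv _ => this kv)]
      refine filter_or_perm _ _ _ ?_
      rintro kv - ⟨h1, h2⟩
      have hv : kv.2 = v := by simpa using h1
      exact hvD (by rw [← hv]; simpa using h2)
    refine List.Perm.trans ?_ (hsplit.map Prod.fst).symm
    rw [List.map_append]
    have hflat : ((v :: D).map (grp lab)).flatten = grp lab v ++ (D.map (grp lab)).flatten := by simp
    rw [hflat]
    have : grp lab v = (lab.filter (fun kv => kv.2 == v)).map Prod.fst := rfl
    rw [this]
    exact ihD.append_left _

-- ===== new B-side lemmas (sorted neighbour scan) =====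

-- B's scan is applyTags over the keys of the enumerate entries passing the test C
theorem tag_scan_char (C : (Int × (Int × Int)) → Bool) (E : List (Int × (Int × Int)))
    (dt : List (Int × List String)) (m : Int) :
    E.foldl (fun st p => if C p then (appendTag st.1 p.2.1 "under", st.2 + 1) else st) (dt, m)
      = (applyTags ((E.filter C).map (fun p => p.2.1)) "under" dt,
         m + (((E.filter C).length : Nat) : Int)) := by
  induction E generalizing dt m with
  | nil => simp [applyTags]
  | cons p E ih =>
    rw [List.foldl_cons]
    by_cases hc : C p = true
    · simp only [hc, if_true]
      rw [ih]
      simp only [List.filter_cons, hc, if_true, List.map_cons, List.length_cons, Prod.mk.injEq]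
      exact ⟨rfl, by push_cast; ring⟩
    · simp only [hc, if_false, Bool.false_eq_true]
      rw [ih]
      simp [hc]

-- two positions satisfying p give 2 ≤ countP
theorem two_le_countP_of_indices {α : Type} (S : List α) (p : α → Bool) (j k : Nat)
    (hjk : j < k) (hk : k < S.length) (hpj : p (S[j]'(by omega)) = true) (hpk : p S[k] = true) :
    2 ≤ S.countP p := by
  have hsplit := List.take_append_drop k S
  have h1 : 0 < (S.take k).countP p := by
    rw [List.countP_pos_iff]
    refine ⟨S[j]'(by omega), ?_, hpj⟩
    rw [List.mem_take_iff_getElem]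
    exact ⟨j, by omega, rfl⟩
  have h2 : 0 < (S.drop k).countP p := by
    rw [List.countP_pos_iff]
    refine ⟨S[k], ?_, hpk⟩
    rw [List.mem_drop_iff_getElem]
    exact ⟨0, by omega, by simp⟩
  calc 2 ≤ (S.take k).countP p + (S.drop k).countP p := by omega
    _ = S.countP p := by rw [← List.countP_append, hsplit]

-- 2 ≤ countP and p at index k give another index with p
theorem other_index_of_two_le_countP {α : Type} (S : List α) (p : α → Bool) (k : Nat)
    (hk : k < S.length) (hpk : p S[k] = true) (h2 : 2 ≤ S.countP p) :
    ∃ j, ∃ hj : j < S.length, j ≠ k ∧ p (S[j]'hj) = true := by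
  have hdrop : S.drop k = S[k] :: S.drop (k+1) := List.drop_eq_getElem_cons hk
  have hcount : S.countP p = (S.take k).countP p + (1 + (S.drop (k+1)).countP p) := by
    conv_lhs => rw [← List.take_append_drop k S]
    rw [List.countP_append, hdrop, List.countP_cons, hpk]
    simp
    omega
  rcases Nat.lt_or_ge 0 ((S.take k).countP p) with h | h
  · obtain ⟨x, hx, hpx⟩ := List.countP_pos_iff.mp h
    obtain ⟨j, hj, hje⟩ := List.mem_take_iff_getElem.mp hx
    exact ⟨j, by omega, by omega, by rw [hje]; exact hpx⟩
  · have h3 : 0 < (S.drop (k+1)).countP p := by omega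
    obtain ⟨x, hx, hpx⟩ := List.countP_pos_iff.mp h3
    obtain ⟨j, hj, hje⟩ := List.mem_drop_iff_getElem.mp hx
    exact ⟨k+1+j, by omega, by omega, by rw [hje]; exact hpx⟩

-- in a list sorted by value, entry k has a same-valued neighbour iff its value is duplicated
theorem neighbour_iff_dup (S : List (Int × Int))
    (hs : S.Pairwise (fun a b => a.2 ≤ b.2)) (k : Nat) (hk : k < S.length) :
    ((0 < k ∧ (S[k-1]'(by omega)).2 = S[k].2)
      ∨ (∃ h2 : k + 1 < S.length, (S[k+1]'h2).2 = S[k].2))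
    ↔ 1 < (S.map Prod.snd).count S[k].2 := by
  have hpw := List.pairwise_iff_getElem.mp hs
  have hcnt : (S.map Prod.snd).count S[k].2 = S.countP (fun kv => kv.2 == S[k].2) := by
    rw [List.count_eq_countP, List.countP_map]
    rfl
  rw [hcnt]
  constructor
  · rintro (⟨h0, he⟩ | ⟨h1, he⟩)
    · have := two_le_countP_of_indices S (fun kv => kv.2 == S[k].2) (k-1) k (by omega) hk
        (by simp [he]) (by simp)
      omega
    · have := two_le_countP_of_indices S (fun kv => kv.2 == S[k].2) k (k+1) (by omega) h1
        (by simp) (by simp [he])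
      omega
  · intro h2
    obtain ⟨j, hj, hjk, hpj⟩ := other_index_of_two_le_countP S (fun kv => kv.2 == S[k].2) k hk
      (by simp) (by omega)
    have hje : (S[j]'hj).2 = S[k].2 := by simpa using hpj
    rcases Nat.lt_or_gt_of_ne hjk with hlt | hgt
    · left
      refine ⟨by omega, ?_⟩
      have hle2 : (S[k-1]'(by omega)).2 ≤ S[k].2 := hpw (k-1) k (by omega) (by omega) (by omega)
      have hle1 : (S[j]'hj).2 ≤ (S[k-1]'(by omega)).2 := by
        rcases Nat.eq_or_lt_of_le (by omega : j ≤ k-1) with he | hlt'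
        · subst he; exact le_refl _
        · exact hpw j (k-1) (by omega) (by omega) hlt'
      omega
    · right
      have h1 : k + 1 < S.length := by omega
      refine ⟨h1, ?_⟩
      have hle1 : S[k].2 ≤ (S[k+1]'h1).2 := hpw k (k+1) (by omega) h1 (by omega)
      have hle2 : (S[k+1]'h1).2 ≤ (S[j]'hj).2 := by
        rcases Nat.eq_or_lt_of_le (by omega : k+1 ≤ j) with he | hlt'
        · subst he; exact le_refl _
        · exact hpw (k+1) j h1 hj hlt'
      omega

-- filter of enumerate by a property of the element, mapped back to elements
theorem filter_enumerate_map (S : List (Int × Int)) (s : Int) (P : (Int × Int) → Bool) :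
    ((PySem.List.enumerate S s).filter (fun p => P p.2)).map (fun p => p.2) = S.filter P := by
  induction S generalizing s with
  | nil => rfl
  | cons x S ih =>
    rw [PySem.List.enumerate_cons, List.filter_cons, List.filter_cons]
    by_cases hp : P x = true
    · simp only [hp, if_true, List.map_cons, ih]
    · simp only [hp, if_false, Bool.false_eq_true, ih]

-- ===== VERDICT (by name: the statement is the Claim_ definition above) =====
theorem find_over_under_spec : Claim_equal_find_over_under := by
  intro dr data _ hpre
  obtain ⟨hdr, hdata, -⟩ := hpre
  simp only [Spec_find_over_under, find_over_under, find_over_under_alt]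
  rw [stepA_eq_stepB]
  set p := dr.foldl stepB (0, PySem.Dict.empty, data) with hp
  set lab := p.2.1.items with hlabdef
  have hlabnd : (lab.map Prod.fst).Nodup := by
    have hkeys := phase1_labels_nodup dr (0, PySem.Dict.empty, data)
      (by simp [PySem.Dict.keys, PySem.Dict.empty])
    simpa [PySem.Dict.keys] using hkeys
  have hdt1 : p.2.2.map Prod.fst = data.map Prod.fst := phase1_fst dr _
  have hdt1nd : (p.2.2.map Prod.fst).Nodup := by rw [hdt1]; exact hdata
  rw [grouping lab hlabnd, res_char lab, nestedA]
  -- the sorted list of label items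
  set S := PySem.List.sorted lab (fun kv => kv.2) false with hSdef
  have hSperm : S.Perm lab := PySem.List.sorted_perm lab (fun kv => kv.2) false
  have hSsort : S.Pairwise (fun a b => a.2 ≤ b.2) := PySem.List.sorted_pairwise lab (fun kv => kv.2)
  have hcnt : ∀ v, (S.map Prod.snd).count v = (lab.map Prod.snd).count v :=
    fun v => (hSperm.map Prod.snd).count_eq v
  -- B's scan as a tag-scan over enumerate S
  have hstepeq : underStepB S (S.length : Int)
      = (fun st q => if ((decide (0 < q.1) && ((PySem.List.pyGet? S (q.1 - 1)).any (fun r => r.2 == q.2.2)))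
          || (decide (q.1 + 1 < (S.length : Int)) && ((PySem.List.pyGet? S (q.1 + 1)).any (fun r => r.2 == q.2.2))))
        then (appendTag st.1 q.2.1 "under", st.2 + 1) else st) := rfl
  rw [hstepeq, tag_scan_char]
  -- the test equals "this entry's value is duplicated"
  have hCP : ∀ q ∈ PySem.List.enumerate S 0,
      ((decide (0 < q.1) && ((PySem.List.pyGet? S (q.1 - 1)).any (fun r => r.2 == q.2.2)))
        || (decide (q.1 + 1 < (S.length : Int)) && ((PySem.List.pyGet? S (q.1 + 1)).any (fun r => r.2 == q.2.2))))
      = (fun kv => decide (1 < (S.map Prod.snd).count kv.2)) q.2 := by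
    intro q hq
    obtain ⟨k, hk, rfl⟩ := (PySem.List.mem_enumerate_iff S 0 q).mp hq
    simp only [zero_add]
    have hiff := neighbour_iff_dup S hSsort k hk
    by_cases h0 : 0 < k
    · have e1 : ((k : Int) - 1) = ((k - 1 : Nat) : Int) := by omega
      rw [e1, PySem.List.pyGet?_natCast, List.getElem?_eq_getElem (by omega)]
      by_cases h1 : k + 1 < S.length
      · have e2 : ((k : Int) + 1) = ((k + 1 : Nat) : Int) := by push_cast; ring
        rw [e2, PySem.List.pyGet?_natCast, List.getElem?_eq_getElem h1]
        simp only [Option.any_some]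
        apply Bool.eq_iff_iff.mpr
        simp only [Bool.or_eq_true, Bool.and_eq_true, beq_iff_eq, decide_eq_true_iff]
        rw [← hiff]
        constructor
        · rintro (⟨-, he⟩ | ⟨-, he⟩)
          · exact Or.inl ⟨h0, he⟩
          · exact Or.inr ⟨h1, he⟩
        · rintro (⟨-, he⟩ | ⟨hw, he⟩)
          · exact Or.inl ⟨by exact_mod_cast h0, he⟩
          · exact Or.inr ⟨by exact_mod_cast h1, he⟩
      · have hfalse : decide ((k : Int) + 1 < (S.length : Int)) = false := by
          simp only [decide_eq_false_iff_not]
          omega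
        rw [hfalse]
        simp only [Option.any_some, Bool.false_and, Bool.or_false]
        apply Bool.eq_iff_iff.mpr
        simp only [Bool.and_eq_true, beq_iff_eq, decide_eq_true_iff]
        rw [← hiff]
        constructor
        · rintro ⟨-, he⟩
          exact Or.inl ⟨h0, he⟩
        · rintro (⟨-, he⟩ | ⟨hc, -⟩)
          · exact ⟨by exact_mod_cast h0, he⟩
          · omega
    · have hfalse : decide ((0 : Int) < (k : Int)) = false := by
        simp only [decide_eq_false_iff_not]
        omega
      rw [hfalse]
      simp only [Bool.false_and, Bool.false_or]
      by_cases h1 : k + 1 < S.length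
      · have e2 : ((k : Int) + 1) = ((k + 1 : Nat) : Int) := by push_cast; ring
        rw [e2, PySem.List.pyGet?_natCast, List.getElem?_eq_getElem h1]
        simp only [Option.any_some]
        apply Bool.eq_iff_iff.mpr
        simp only [Bool.and_eq_true, beq_iff_eq, decide_eq_true_iff]
        rw [← hiff]
        constructor
        · rintro ⟨-, he⟩
          exact Or.inr ⟨h1, he⟩
        · rintro (⟨hc, -⟩ | ⟨hw, he⟩)
          · omega
          · exact ⟨by exact_mod_cast h1, he⟩
      · have hfalse2 : decide ((k : Int) + 1 < (S.length : Int)) = false := by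
          simp only [decide_eq_false_iff_not]
          omega
        rw [hfalse2]
        simp only [Bool.false_and]
        apply (Bool.eq_iff_iff.mpr _).symm
        simp only [decide_eq_true_iff, Bool.false_eq_true, iff_false]
        rw [← hiff]
        rintro (⟨hc, -⟩ | ⟨hc, -⟩)
        · omega
        · omega
  rw [List.filter_congr hCP]
  have hmapsplit : ((PySem.List.enumerate S 0).filter
        (fun q => (fun kv => decide (1 < (S.map Prod.snd).count kv.2)) q.2)).map (fun q => q.2.1)
      = (S.filter (fun kv => decide (1 < (S.map Prod.snd).count kv.2))).map Prod.fst := by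
    rw [← filter_enumerate_map S 0 (fun kv => decide (1 < (S.map Prod.snd).count kv.2)), List.map_map]
    rfl
  rw [hmapsplit]
  -- both tag-key lists are permutations of the duplicated-value keys of lab
  have hfeq : S.filter (fun kv => decide (1 < (S.map Prod.snd).count kv.2))
      |>.Perm (lab.filter (fun kv => decide (1 < (lab.map Prod.snd).count kv.2))) := by
    have : (fun kv : Int × Int => decide (1 < (S.map Prod.snd).count kv.2))
        = (fun kv : Int × Int => decide (1 < (lab.map Prod.snd).count kv.2)) := by
      funext kv
      rw [hcnt]
    rw [this]
    exact hSperm.filter _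
  set D := (PySem.Set.ofList (lab.map Prod.snd)).filter
      (fun v => decide (1 < (lab.map Prod.snd).count v)) with hD
  have hDnd : D.Nodup := (PySem.Set.nodup_ofList _).filter _
  have hmemD : ∀ kv ∈ lab, decide (kv.2 ∈ D) = decide (1 < (lab.map Prod.snd).count kv.2) := by
    intro kv hkv
    have h2 : kv.2 ∈ lab.map Prod.snd := List.mem_map_of_mem hkv
    by_cases hc : 1 < (lab.map Prod.snd).count kv.2
    · simp [hD, List.mem_filter, (PySem.Set.mem_ofList _ _).mpr h2, hc]
    · simp [hD, List.mem_filter, hc]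
  have hperm : ((D.map (grp lab)).flatten).Perm
      ((S.filter (fun kv => decide (1 < (S.map Prod.snd).count kv.2))).map Prod.fst) := by
    refine ((permGroup lab D hDnd).trans ?_).trans (hfeq.map Prod.fst).symm
    rw [List.filter_congr hmemD]
  simp only [Prod.mk.injEq]
  refine ⟨?_, trivial, ?_⟩
  · rw [applyTags_char _ _ _ hdt1nd, applyTags_char _ _ _ hdt1nd]
    apply List.map_congr_left
    intro e _
    rw [hperm.count_eq]
  · have hlen := congrArg List.length (filter_enumerate_map S 0 (fun kv => decide (1 < (S.map Prod.snd).count kv.2)))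
    rw [List.length_map] at hlen
    rw [hperm.length_eq, List.length_map, hlen]
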